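-- pv_equiv track=rewrite | github.com/kedarnath6970/algorithm | python/min_breaks.py | find_min_breaks
-- ===== SOURCE A (Python) =====
-- def find_min_breaks(pitches, num_pitches):
--     upCount = 0
--     downCount = 0
--     violations = 0
--     pitches = [pitches[i] for i in range(0, num_pitches)
--             if i == 0 or pitches[i - 1] != pitches[i]]
--     for i in range(1, len(pitches)):
--         if pitches[i] > pitches[i - 1]:
--             upCount += 1
--             downCount = 0
--         else:
--             downCount += 1
--             upCount = 0
--         if upCount > 3 or downCount > 3:
--             violations += 1
--             upCount = downCount = 0
--     return violations
-- ===== SOURCE B (Python) =====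
-- def find_min_breaks(pitches, num_pitches):
--     dedup = [pitches[i] for i in range(0, num_pitches)
--              if i == 0 or pitches[i - 1] != pitches[i]]
--     # run decomposition: jump over each maximal strictly-monotone run of steps
--     # dedup[i..j]; a run of L = j - i steps contributes L // 4 violations.
--     total = 0
--     n = len(dedup)
--     i = 0
--     while i + 1 < n:
--         up = dedup[i + 1] > dedup[i]
--         j = i + 1
--         while j + 1 < n and (dedup[j + 1] > dedup[j]) == up:
--             j += 1
--         total += (j - i) // 4
--         i = j
--     return total
-- ===== Notes on version B (the rewrite author's own statement) =====
-- stated objective: alternative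
-- what changed: Replaces A's element-by-element scan with reset-at-4 up/down counters by a run-decomposition with nested index loops: the outer loop jumps from one maximal strictly-monotone run boundary to the next and adds run_length // 4 per run via floor division.
import Mathlib
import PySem

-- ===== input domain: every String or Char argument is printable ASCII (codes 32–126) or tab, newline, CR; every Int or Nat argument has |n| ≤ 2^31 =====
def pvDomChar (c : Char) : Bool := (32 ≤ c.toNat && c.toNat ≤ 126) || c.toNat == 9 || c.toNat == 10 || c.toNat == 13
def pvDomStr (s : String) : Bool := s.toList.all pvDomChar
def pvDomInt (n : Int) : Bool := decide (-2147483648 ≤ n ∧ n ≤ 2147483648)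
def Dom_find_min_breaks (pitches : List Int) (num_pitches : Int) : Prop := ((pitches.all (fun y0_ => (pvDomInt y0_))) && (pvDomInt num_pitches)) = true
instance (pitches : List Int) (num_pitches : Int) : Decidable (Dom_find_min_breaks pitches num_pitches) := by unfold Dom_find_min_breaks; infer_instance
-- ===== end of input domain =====

-- B replaces A's reset-at-4 up/down counters by a run-decomposition (nested index loops; each maximal monotone run of L steps adds L // 4): an alternative decomposition, same cost; equivalence proved on Pre_ (num_pitches ≤ len(pitches), where A does not raise).


-- ===== PORT A =====
def find_min_breaks (pitches : List Int) (num_pitches : Int) : Int :=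
  -- pitches = [pitches[i] for i in range(0, num_pitches) if i == 0 or pitches[i-1] != pitches[i]]
  let ded : List Int := (PySem.List.pyRange 0 num_pitches 1).foldl (fun acc i =>
      if i = 0 ∨ PySem.List.pyGetD pitches (i - 1) 0 ≠ PySem.List.pyGetD pitches i 0
      then acc ++ [PySem.List.pyGetD pitches i 0] else acc) []
  -- for i in range(1, len(pitches)): update upCount/downCount, count violations
  let st : Int × Int × Int := (PySem.List.pyRange 1 (ded.length : Int) 1).foldl
    (fun (s : Int × Int × Int) i =>
      let s1 := if PySem.List.pyGetD ded i 0 > PySem.List.pyGetD ded (i - 1) 0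
                then (s.1 + 1, (0 : Int), s.2.2) else ((0 : Int), s.2.1 + 1, s.2.2)
      if s1.1 > 3 ∨ s1.2.1 > 3 then ((0 : Int), (0 : Int), s1.2.2 + 1) else s1)
    (0, 0, 0)
  st.2.2

-- ===== PORT B =====
-- inner while loop of Source B: 'j = i+1; while j+1 < n and (dedup[j+1] > dedup[j]) == up: j += 1'
-- (j is a nonnegative Python int, so Nat indices are exact; the fuel argument only bounds the
-- number of iterations — it is always called with fuel = ded.length ≥ the iteration count)
def pvInnerB (ded : List Int) (u : Bool) : Nat → Nat → Nat
  | 0, j => j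
  | fuel + 1, j =>
      if j + 1 < ded.length ∧ decide (ded.getD (j + 1) 0 > ded.getD j 0) = u
      then pvInnerB ded u fuel (j + 1)
      else j

-- outer while loop of Source B; 'total += (j - i) // 4' is exact as Nat subtraction/division since i ≤ j
def pvOuterB (ded : List Int) : Nat → Int → Nat → Int
  | 0, total, _ => total
  | fuel + 1, total, i =>
      if i + 1 < ded.length then
        let u := decide (ded.getD (i + 1) 0 > ded.getD i 0)
        let j := pvInnerB ded u ded.length (i + 1)
        pvOuterB ded fuel (total + (((j - i) / 4 : Nat) : Int)) j
      else total

def find_min_breaks_alt (pitches : List Int) (num_pitches : Int) : Int :=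
  -- same dedup comprehension as A
  let ded : List Int := (PySem.List.pyRange 0 num_pitches 1).foldl (fun acc i =>
      if i = 0 ∨ PySem.List.pyGetD pitches (i - 1) 0 ≠ PySem.List.pyGetD pitches i 0
      then acc ++ [PySem.List.pyGetD pitches i 0] else acc) []
  pvOuterB ded ded.length 0 0

-- ===== PRECONDITION & SPEC =====
-- Pre_ excludes exactly the inputs where Python A raises IndexError: num_pitches larger than len(pitches).
def Pre_find_min_breaks (pitches : List Int) (num_pitches : Int) : Prop :=
  num_pitches ≤ (pitches.length : Int)
instance (pitches : List Int) (num_pitches : Int) : Decidable (Pre_find_min_breaks pitches num_pitches) := by unfold Pre_find_min_breaks; infer_instance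

def pvWitness_find_min_breaks : List Int × Int := ([1, 2, 3, 4, 5, 4, 3], 7)

def Spec_find_min_breaks (pitches : List Int) (num_pitches : Int) (out : Int) : Prop := out = find_min_breaks_alt pitches num_pitches
instance (pitches : List Int) (num_pitches : Int) (out : Int) : Decidable (Spec_find_min_breaks pitches num_pitches out) := by unfold Spec_find_min_breaks; infer_instance

-- ===== CLAIM (what is proved, stated in full; the proofs are below) =====
def Claim_equal_find_min_breaks : Prop := ∀ (pitches : List Int) (num_pitches : Int), Dom_find_min_breaks pitches num_pitches → Pre_find_min_breaks pitches num_pitches → Spec_find_min_breaks pitches num_pitches (find_min_breaks pitches num_pitches)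

-- ===== LEMMAS AND PROOFS =====

-- A's loop body as a step on the state (upCount, downCount, violations), driven by "step goes up"
def pvStepA (s : Int × Int × Int) (u : Bool) : Int × Int × Int :=
  let s1 := if u then (s.1 + 1, (0 : Int), s.2.2) else ((0 : Int), s.2.1 + 1, s.2.2)
  if s1.1 > 3 ∨ s1.2.1 > 3 then ((0 : Int), (0 : Int), s1.2.2 + 1) else s1

-- A's fold, phrased structurally on the value list
def pvFoldA : List Int → (Int × Int × Int) → (Int × Int × Int)
  | [], s => s
  | [_], s => s
  | a :: b :: t, s => pvFoldA (b :: t) (pvStepA s (decide (b > a)))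

-- number of leading steps of prev :: l that go in direction u
def pvRunLen (u : Bool) (prev : Int) : List Int → Nat
  | [] => 0
  | x :: t => if decide (x > prev) = u then 1 + pvRunLen u x t else 0

-- specification: sum of (run length) / 4 over maximal monotone runs
def pvSpecCount : List Int → Int
  | [] => 0
  | [_] => 0
  | a :: b :: t =>
      let r := pvRunLen (decide (b > a)) b t
      (((1 + r) / 4 : Nat) : Int) + pvSpecCount ((b :: t).drop r)
termination_by l => l.length
decreasing_by simp [List.length_drop]

-- A's state in the middle of a run of direction u: active counter c, other 0
def pvStA (u : Bool) (c : Nat) (v : Int) : Int × Int × Int :=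
  if u then ((c : Int), 0, v) else (0, (c : Int), v)

lemma pvSpecCount_nil : pvSpecCount ([] : List Int) = 0 := by
  unfold pvSpecCount; rfl

lemma pvSpecCount_single (a : Int) : pvSpecCount [a] = 0 := by
  unfold pvSpecCount; rfl

lemma pvSpecCount_cons (a b : Int) (t : List Int) :
    pvSpecCount (a :: b :: t)
      = (((1 + pvRunLen (decide (b > a)) b t) / 4 : Nat) : Int)
        + pvSpecCount ((b :: t).drop (pvRunLen (decide (b > a)) b t)) := by
  conv_lhs => unfold pvSpecCount

lemma pvSpecCount_short (xs : List Int) (h : xs.length ≤ 1) : pvSpecCount xs = 0 := by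
  match xs, h with
  | [], _ => exact pvSpecCount_nil
  | [_], _ => exact pvSpecCount_single _

lemma pvStepA_same (u : Bool) (c : Nat) (v : Int) (hc : c ≤ 3) :
    pvStepA (pvStA u c v) u = if c = 3 then pvStA u 0 (v + 1) else pvStA u (c + 1) v := by
  cases u <;> simp only [pvStepA, pvStA, if_true, if_false, Bool.false_eq_true] <;>
    split_ifs <;> simp_all <;> omega

lemma pvStepA_diff (u u' : Bool) (c : Nat) (v : Int) (h : u' ≠ u) :
    pvStepA (pvStA u c v) u' = pvStA u' 1 v := by
  cases u <;> cases u' <;> simp_all [pvStepA, pvStA]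

-- main invariant: A's fold from mid-run state vs the per-run closed form
lemma pvFoldA_run (xs : List Int) : ∀ (b : Int) (u : Bool) (c : Nat) (v : Int), c ≤ 3 →
    (pvFoldA (b :: xs) (pvStA u c v)).2.2
      = v + (((c + pvRunLen u b xs) / 4 : Nat) : Int)
          + pvSpecCount ((b :: xs).drop (pvRunLen u b xs)) := by
  induction xs with
  | nil =>
      intro b u c v hc
      have : c / 4 = 0 := by omega
      simp [pvFoldA, pvRunLen, pvSpecCount_single, this]
      cases u <;> simp [pvStA]
  | cons x t ih =>
      intro b u c v hc
      by_cases hdir : decide (x > b) = u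
      · -- same direction: run continues
        have hrun : pvRunLen u b (x :: t) = 1 + pvRunLen u x t := by
          simp only [pvRunLen]; rw [if_pos hdir]
        have hfold : pvFoldA (b :: x :: t) (pvStA u c v)
            = pvFoldA (x :: t) (pvStepA (pvStA u c v) u) := by
          simp only [pvFoldA]; rw [hdir]
        by_cases hc3 : c = 3
        · rw [hfold, pvStepA_same u c v hc, if_pos hc3]
          rw [ih x u 0 (v + 1) (by omega)]
          subst hc3
          rw [hrun, show 1 + pvRunLen u x t = pvRunLen u x t + 1 from by omega]
          simp only [List.drop_succ_cons]
          rw [show ((3 + (pvRunLen u x t + 1)) / 4 : Nat)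
              = (0 + pvRunLen u x t) / 4 + 1 from by omega]
          push_cast
          ring
        · rw [hfold, pvStepA_same u c v hc, if_neg hc3]
          rw [ih x u (c + 1) v (by omega)]
          rw [hrun, show 1 + pvRunLen u x t = pvRunLen u x t + 1 from by omega]
          simp only [List.drop_succ_cons]
          rw [show (c + (pvRunLen u x t + 1) : Nat) = c + 1 + pvRunLen u x t from by omega]
      · -- direction change: run of A restarts memorylessly
        have hrun : pvRunLen u b (x :: t) = 0 := by
          simp only [pvRunLen]; rw [if_neg hdir]
        have hfold : pvFoldA (b :: x :: t) (pvStA u c v)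
            = pvFoldA (x :: t) (pvStA (decide (x > b)) 1 v) := by
          simp only [pvFoldA]
          rw [pvStepA_diff u (decide (x > b)) c v hdir]
        rw [hfold, hrun, ih x (decide (x > b)) 1 v (by omega)]
        have hc4 : ((c + 0) / 4 : Nat) = 0 := by omega
        rw [hc4]
        simp only [List.drop_zero, Nat.cast_zero, add_zero]
        rw [pvSpecCount_cons]
        ring

lemma pvFoldA_spec (xs : List Int) : (pvFoldA xs (0, 0, 0)).2.2 = pvSpecCount xs := by
  match xs with
  | [] => exact (pvSpecCount_nil).symm
  | [_] => exact (pvSpecCount_single _).symm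
  | a :: b :: t =>
      have hstep : pvStepA (0, 0, 0) (decide (b > a)) = pvStA (decide (b > a)) 1 0 := by
        cases hd : decide (b > a) <;> simp [pvStepA, pvStA]
      have : pvFoldA (a :: b :: t) ((0 : Int), (0 : Int), (0 : Int))
          = pvFoldA (b :: t) (pvStA (decide (b > a)) 1 0) := by
        simp [pvFoldA, hstep]
      rw [this, pvFoldA_run t b (decide (b > a)) 1 0 (by omega)]
      rw [pvSpecCount_cons]
      simp

-- A's index-driven loop over ded equals pvFoldA
lemma pvA_fold_eq (L : List Int) (sa : Int × Int × Int) :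
    (PySem.List.pyRange 1 (L.length : Int) 1).foldl
      (fun (s : Int × Int × Int) i =>
        let s1 := if PySem.List.pyGetD L i 0 > PySem.List.pyGetD L (i - 1) 0
                  then (s.1 + 1, (0 : Int), s.2.2) else ((0 : Int), s.2.1 + 1, s.2.2)
        if s1.1 > 3 ∨ s1.2.1 > 3 then ((0 : Int), (0 : Int), s1.2.2 + 1) else s1)
      sa
    = (L.zip (L.drop 1)).foldl (fun s p => pvStepA s (decide (p.2 > p.1))) sa := by
  have hP : (L.zip (L.drop 1)).foldl (fun s p => pvStepA s (decide (p.2 > p.1))) sa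
      = (PySem.List.pyRange 0 ((L.zip (L.drop 1)).length : Int) 1).foldl
          (fun s j => pvStepA s (decide ((PySem.List.pyGetD (L.zip (L.drop 1)) j (0, 0)).2 > (PySem.List.pyGetD (L.zip (L.drop 1)) j (0, 0)).1))) sa := by
    exact (PySem.List.foldl_pyRange_zero_pyGetD' (L.zip (L.drop 1)) (0, 0) _ sa).symm
  rw [hP, PySem.List.pyRange_one, PySem.List.pyRange_one, List.foldl_map, List.foldl_map]
  have hlen : (((L.zip (L.drop 1)).length : Int) - 0).toNat = (((L.length : Int)) - 1).toNat := by
    simp [List.length_zip]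
  rw [hlen]
  apply PySem.List.foldl_congr_mem
  intro s k hk
  have hk' : k < L.length - 1 := by
    have := List.mem_range.mp hk; omega
  have hk1 : k + 1 < L.length := by omega
  have e1 : (1 : Int) + (k : Int) = ((k + 1 : Nat) : Int) := by omega
  have e3 : (0 : Int) + (k : Int) = ((k : Nat) : Int) := by omega
  rw [e1]
  have e4 : ((k + 1 : Nat) : Int) - 1 = ((k : Nat) : Int) := by omega
  simp only [e4, PySem.List.pyGetD_natCast, e3]
  have g1 : L.getD (k + 1) 0 = L[k + 1] := List.getD_eq_getElem L 0 hk1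
  have g2 : L.getD k 0 = L[k] := List.getD_eq_getElem L 0 (by omega)
  have hkz : k < (L.zip (L.drop 1)).length := by simp [List.length_zip]; omega
  have g3 : (L.zip (L.drop 1)).getD k (0, 0) = (L[k], L[k + 1]) := by
    rw [List.getD_eq_getElem _ _ hkz, List.getElem_zip]
    simp
  rw [g1, g2, g3]
  by_cases h : L[k + 1] > L[k] <;> simp [pvStepA, h]

lemma pvZip_fold_eq (xs : List Int) : ∀ s,
    (xs.zip (xs.drop 1)).foldl (fun s p => pvStepA s (decide (p.2 > p.1))) s = pvFoldA xs s := by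
  induction xs with
  | nil => intro s; rfl
  | cons a rest ih =>
      intro s
      cases rest with
      | nil => rfl
      | cons b t =>
          simp only [List.drop_succ_cons, List.drop_zero, List.zip_cons_cons, List.foldl_cons]
          have := ih (pvStepA s (decide (b > a)))
          simp only [List.drop_succ_cons, List.drop_zero] at this ⊢
          rw [this]
          rfl

-- B's inner while loop computes j + (leading run length from position j), given enough fuel
lemma pvInnerB_eq (ded : List Int) (u : Bool) : ∀ (fuel j : Nat),
    ded.length ≤ j + 1 + fuel → j < ded.length →
    pvInnerB ded u fuel j = j + pvRunLen u (ded.getD j 0) (ded.drop (j + 1)) := by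
  intro fuel
  induction fuel with
  | zero =>
      intro j hfuel _
      have hdrop : ded.drop (j + 1) = [] := List.drop_eq_nil_of_le (by omega)
      simp [pvInnerB, hdrop, pvRunLen]
  | succ fuel ih =>
      intro j hfuel hj
      by_cases h1 : j + 1 < ded.length
      · have hdrop : ded.drop (j + 1) = ded.getD (j + 1) 0 :: ded.drop (j + 1 + 1) := by
          rw [List.getD_eq_getElem _ _ h1, List.drop_eq_getElem_cons h1]
        by_cases hdir : decide (ded.getD (j + 1) 0 > ded.getD j 0) = u
        · rw [pvInnerB, if_pos ⟨h1, hdir⟩]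
          rw [ih (j + 1) (by omega) h1]
          rw [hdrop]
          simp only [pvRunLen]; rw [if_pos hdir]
          omega
        · rw [pvInnerB, if_neg (fun hcon => hdir hcon.2)]
          rw [hdrop]
          simp only [pvRunLen]; rw [if_neg hdir]
          omega
      · have hdrop : ded.drop (j + 1) = [] := List.drop_eq_nil_of_le (by omega)
        rw [pvInnerB, if_neg (fun hcon => h1 hcon.1)]
        simp [hdrop, pvRunLen]

-- B's outer while loop accumulates pvSpecCount of the remaining suffix, given enough fuel
lemma pvOuterB_eq (ded : List Int) : ∀ (fuel : Nat) (total : Int) (i : Nat),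
    ded.length ≤ i + 1 + fuel →
    pvOuterB ded fuel total i = total + pvSpecCount (ded.drop i) := by
  intro fuel
  induction fuel with
  | zero =>
      intro total i hfuel
      have : pvSpecCount (ded.drop i) = 0 := by
        apply pvSpecCount_short
        simp [List.length_drop]; omega
      simp [pvOuterB, this]
  | succ fuel ih =>
      intro total i hfuel
      by_cases h1 : i + 1 < ded.length
      · have hi : i < ded.length := by omega
        have hdropi : ded.drop i = ded.getD i 0 :: ded.drop (i + 1) := by
          rw [List.getD_eq_getElem _ _ hi, List.drop_eq_getElem_cons hi]
        have hdropi1 : ded.drop (i + 1) = ded.getD (i + 1) 0 :: ded.drop (i + 1 + 1) := by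
          rw [List.getD_eq_getElem _ _ h1, List.drop_eq_getElem_cons h1]
        set u := decide (ded.getD (i + 1) 0 > ded.getD i 0) with hu
        set r := pvRunLen u (ded.getD (i + 1) 0) (ded.drop (i + 1 + 1)) with hr
        have hinner : pvInnerB ded u ded.length (i + 1) = i + 1 + r :=
          pvInnerB_eq ded u ded.length (i + 1) (by omega) h1
        rw [pvOuterB, if_pos h1]
        show pvOuterB ded fuel (total + (((pvInnerB ded u ded.length (i + 1) - i) / 4 : Nat) : Int))
              (pvInnerB ded u ded.length (i + 1)) = total + pvSpecCount (ded.drop i)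
        rw [hinner]
        rw [ih _ (i + 1 + r) (by omega)]
        have hsub : (i + 1 + r - i : Nat) = 1 + r := by omega
        have hdropj : ded.drop (i + 1 + r) = (ded.drop (i + 1)).drop r := by
          rw [List.drop_drop]
        rw [hsub, hdropj]
        have hcount : pvSpecCount (ded.drop i)
            = (((1 + r) / 4 : Nat) : Int) + pvSpecCount ((ded.drop (i + 1)).drop r) := by
          rw [hdropi, hdropi1]
          rw [pvSpecCount_cons]
        rw [hcount]
        ring
      · have : pvSpecCount (ded.drop i) = 0 := by
          apply pvSpecCount_short
          simp [List.length_drop]; omega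
        rw [pvOuterB, if_neg h1, this, add_zero]

-- A's counting loop on any deduplicated list equals B's outer while loop
lemma pvMain (L : List Int) :
    ((PySem.List.pyRange 1 (L.length : Int) 1).foldl
      (fun (s : Int × Int × Int) i =>
        let s1 := if PySem.List.pyGetD L i 0 > PySem.List.pyGetD L (i - 1) 0
                  then (s.1 + 1, (0 : Int), s.2.2) else ((0 : Int), s.2.1 + 1, s.2.2)
        if s1.1 > 3 ∨ s1.2.1 > 3 then ((0 : Int), (0 : Int), s1.2.2 + 1) else s1)
      (0, 0, 0)).2.2 = pvOuterB L L.length 0 0 := by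
  rw [pvA_fold_eq, pvZip_fold_eq, pvFoldA_spec, pvOuterB_eq L L.length 0 0 (by omega)]
  simp

-- ===== VERDICT (by name: the statement is the Claim_ definition above) =====
theorem find_min_breaks_spec : Claim_equal_find_min_breaks := by
  intro pitches num_pitches _ _
  unfold Spec_find_min_breaks
  exact pvMain _
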